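-- pv_equiv track=rewrite | github.com/NeapolitanIcecream/recoleta | recoleta/publish/trend_notes.py | _sanitize_obsidian_tag
-- ===== SOURCE A (Python) =====
-- def _sanitize_obsidian_tag(value: str) -> str:
--     raw = str(value or "").strip()
--     if not raw:
--         return ""
--     normalized = "".join(
--         ch if (ch.isalnum() or ch in {"-", "_", "/"}) else "-" for ch in raw
--     )
--     while "--" in normalized:
--         normalized = normalized.replace("--", "-")
--     normalized = normalized.strip("-")
--     return normalized.lower()
-- ===== SOURCE B (Python) =====
-- def _sanitize_obsidian_tag(value: str) -> str:
--     raw = str(value or "").strip()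
--     if not raw:
--         return ""
--     out = []
--     for ch in raw:
--         c = ch if (ch.isalnum() or ch in "-_/") else "-"
--         if c == "-" and (not out or out[-1] == "-"):
--             continue  # never start with a dash, never emit a second dash in a row
--         out.append(c)
--     if out and out[-1] == "-":
--         out.pop()  # at most one trailing dash can remain
--     return "".join(out).lower()
-- ===== Notes on version B (the rewrite author's own statement) =====
-- stated objective: alternative
-- what changed: Replaces the repeated whole-string replace('--','-') fixpoint loop plus strip('-') with a single left-to-right pass that suppresses leading/duplicate dashes while building the result and drops at most one trailing dash.
import Mathlib
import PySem

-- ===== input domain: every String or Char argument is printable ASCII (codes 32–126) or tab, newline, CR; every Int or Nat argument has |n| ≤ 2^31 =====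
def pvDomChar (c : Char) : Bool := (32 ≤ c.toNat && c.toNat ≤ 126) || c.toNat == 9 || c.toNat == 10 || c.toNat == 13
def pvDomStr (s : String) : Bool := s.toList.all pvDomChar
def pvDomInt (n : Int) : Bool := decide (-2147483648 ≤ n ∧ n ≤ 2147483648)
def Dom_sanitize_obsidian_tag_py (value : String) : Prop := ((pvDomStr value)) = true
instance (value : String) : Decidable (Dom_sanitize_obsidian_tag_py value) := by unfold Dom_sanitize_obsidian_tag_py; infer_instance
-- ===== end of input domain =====

-- B replaces A's repeated replace("--","-") passes + strip("-") by one left-to-right pass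
-- that suppresses leading/duplicate dashes while building and drops at most one trailing dash.

-- ===== PORT A =====

-- structural form of Python's s.replace("--", "-") (left-to-right, non-overlapping),
-- used only to prove termination of the while-loop below
def replaceDD : List Char → List Char
  | [] => []
  | [c] => [c]
  | c :: d :: r => if c = '-' ∧ d = '-' then '-' :: replaceDD r else c :: replaceDD (d :: r)

-- structural form of '"--" in s'
def hasDD : List Char → Bool
  | c :: d :: r => (decide (c = '-') && decide (d = '-')) || hasDD (d :: r)
  | _ => false

theorem replaceDD_length_le (s : List Char) : (replaceDD s).length ≤ s.length := by
  fun_induction replaceDD s <;> simp_all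
  all_goals omega

theorem replaceDD_length_lt (s : List Char) (h : hasDD s = true) :
    (replaceDD s).length < s.length := by
  match s with
  | [] => simp [hasDD] at h
  | [c] => simp [hasDD] at h
  | c :: d :: r =>
    by_cases hcd : c = '-' ∧ d = '-'
    · obtain ⟨rfl, rfl⟩ := hcd
      have := replaceDD_length_le r
      simp [replaceDD]; omega
    · have hd : hasDD (d :: r) = true := by
        rw [hasDD] at h
        rcases Bool.or_eq_true_iff.mp h with h1 | h1
        · exact absurd ⟨of_decide_eq_true (Bool.and_eq_true_iff.mp h1).1,
            of_decide_eq_true (Bool.and_eq_true_iff.mp h1).2⟩ hcd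
        · exact h1
      have := replaceDD_length_lt (d :: r) hd
      simp only [List.length_cons] at this
      simp [replaceDD, hcd]; omega

theorem replace_go_eq (fuel : Nat) (l acc : List Char) (hf : l.length ≤ fuel) :
    PySem.Chars.replace.go ['-', '-'] ['-'] fuel l acc = acc.reverse ++ replaceDD l := by
  induction fuel generalizing l acc with
  | zero =>
    have : l = [] := by cases l <;> simp_all
    subst this; simp [PySem.Chars.replace.go, replaceDD]
  | succ n ih =>
    match l with
    | [] => simp [PySem.Chars.replace.go, replaceDD]
    | c :: t =>
      rw [PySem.Chars.replace.go]
      by_cases hp : (['-', '-'] : List Char).isPrefixOf (c :: t) = true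
      · simp only [hp, if_pos]
        match t, hp with
        | d :: r, hp =>
          obtain ⟨h1, h2⟩ : '-' = c ∧ '-' = d := by
            simpa [List.isPrefixOf] using hp
          subst h1; subst h2
          simp only [List.length_cons] at hf
          rw [show List.drop (['-', '-'] : List Char).length ('-' :: '-' :: r) = r from rfl]
          rw [ih r ((['-'] : List Char).reverse ++ acc) (by omega)]
          simp [replaceDD]
        | [], hp => simp [List.isPrefixOf] at hp
      · simp only [hp, if_neg, Bool.false_eq_true, not_false_eq_true, if_neg]
        simp only [List.length_cons] at hf
        rw [ih t (c :: acc) (by omega)]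
        match t with
        | [] => simp [replaceDD]
        | d :: r =>
          have : ¬ (c = '-' ∧ d = '-') := by
            intro ⟨h1, h2⟩; subst h1; subst h2; simp [List.isPrefixOf] at hp
          simp [replaceDD, this]

theorem replace_eq_replaceDD (s : List Char) :
    PySem.Chars.replace s ['-', '-'] ['-'] = replaceDD s := by
  rw [PySem.Chars.replace]
  simp [replace_go_eq s.length s [] (le_refl _)]

theorem hasDD_iff_infix (s : List Char) : hasDD s = true ↔ ['-', '-'] <:+: s := by
  induction s with
  | nil =>
    simp only [hasDD, List.infix_nil]
    constructor
    · intro h; simp at h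
    · intro h; simp at h
  | cons c t ih =>
    cases t with
    | nil =>
      rw [List.infix_cons_iff]
      constructor
      · intro h; simp [hasDD] at h
      · rintro (h | h)
        · have := h.length_le; simp at this
        · rw [List.infix_nil] at h; simp at h
    | cons d r =>
      rw [List.infix_cons_iff, List.cons_prefix_cons]
      simp only [hasDD, Bool.or_eq_true, Bool.and_eq_true, decide_eq_true_eq, ih,
        List.infix_cons_iff, List.cons_prefix_cons, List.nil_prefix, and_true]
      tauto

theorem isIn_eq_hasDD (s : List Char) : PySem.Chars.isIn ['-', '-'] s = hasDD s := by
  by_cases h : hasDD s = true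
  · rw [h]; exact (PySem.Chars.isIn_iff_infix _ _).mpr ((hasDD_iff_infix s).mp h)
  · simp only [Bool.not_eq_true] at h; rw [h]
    exact (PySem.Chars.isIn_eq_false_iff _ _).mpr (fun hc => by simp [(hasDD_iff_infix s).mpr hc] at h)

-- the while loop of A: while "--" in normalized: normalized = normalized.replace("--", "-")
def pyWhileCollapse (s : List Char) : List Char :=
  if PySem.Chars.isIn ['-', '-'] s then
    pyWhileCollapse (PySem.Chars.replace s ['-', '-'] ['-'])
  else s
termination_by s.length
decreasing_by
  rw [replace_eq_replaceDD]
  exact replaceDD_length_lt s (by rwa [isIn_eq_hasDD] at *)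

def sanitize_obsidian_tag_py (value : String) : String :=
  let raw := PySem.Chars.strip value.toList
  if raw.isEmpty then "" else
  let normalized := raw.map (fun ch =>
    if PySem.Chars.isalnum ch || (decide (ch = '-') || decide (ch = '_') || decide (ch = '/')) then ch else '-')
  let collapsed := pyWhileCollapse normalized
  String.ofList (PySem.Chars.lower (PySem.Chars.stripChars collapsed ['-']))

-- ===== PORT B =====
def sanitize_obsidian_tag_py_alt (value : String) : String :=
  let raw := PySem.Chars.strip value.toList
  if raw.isEmpty then "" else
  let out := raw.foldl (fun out ch =>
    let c := if PySem.Chars.isalnum ch || (decide (ch = '-') || decide (ch = '_') || decide (ch = '/')) then ch else '-'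
    if decide (c = '-') && (out.isEmpty || out.getLast? == some '-') then out else out ++ [c]) []
  let out := if out.getLast? == some '-' then out.dropLast else out
  String.ofList (PySem.Chars.lower out)

-- ===== PRECONDITION & SPEC =====
def Spec_sanitize_obsidian_tag_py (value : String) (out : String) : Prop := out = sanitize_obsidian_tag_py_alt value
instance (value : String) (out : String) : Decidable (Spec_sanitize_obsidian_tag_py value out) := by unfold Spec_sanitize_obsidian_tag_py; infer_instance

-- ===== CLAIM (what is proved, stated in full; the proofs are below) =====
def Claim_equal_sanitize_obsidian_tag_py : Prop := ∀ (value : String), Dom_sanitize_obsidian_tag_py value → Spec_sanitize_obsidian_tag_py value (sanitize_obsidian_tag_py value)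

-- ===== LEMMAS AND PROOFS =====

-- canonical dash-collapsed form: the fixpoint A's while loop reaches
def squeeze : List Char → List Char
  | [] => []
  | [c] => [c]
  | c :: d :: r => if c = '-' ∧ d = '-' then squeeze ('-' :: r) else c :: squeeze (d :: r)
termination_by s => s.length

-- drop one leading dash
def ldrop (s : List Char) : List Char :=
  match s with
  | c :: r => if c = '-' then r else s
  | [] => []

theorem squeeze_cons (c : Char) (t : List Char) :
    squeeze (c :: t) = if c = '-' then '-' :: ldrop (squeeze t) else c :: squeeze t := by
  match t with
  | [] =>
    by_cases hc : c = '-' <;> simp [squeeze, ldrop, hc]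
  | d :: r =>
    by_cases hc : c = '-'
    · subst hc
      by_cases hd : d = '-'
      · subst hd
        have h1 : squeeze ('-' :: r) = '-' :: ldrop (squeeze r) := by
          rw [squeeze_cons '-' r, if_pos rfl]
        rw [show squeeze ('-' :: '-' :: r) = squeeze ('-' :: r) from by simp [squeeze]]
        rw [if_pos rfl, h1]
        simp [ldrop]
      · have h2 := squeeze_cons d r
        rw [if_neg hd] at h2
        rw [show squeeze ('-' :: d :: r) = '-' :: squeeze (d :: r) from by
          simp [squeeze, hd]]
        rw [if_pos rfl, h2]
        simp [ldrop, hd]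
    · rw [if_neg hc]
      rw [show squeeze (c :: d :: r) = c :: squeeze (d :: r) from by
        rw [squeeze]; rw [if_neg (fun h => hc h.1)]]

theorem squeeze_head (c : Char) (t : List Char) : ∃ u, squeeze (c :: t) = c :: u := by
  rw [squeeze_cons]
  by_cases hc : c = '-'
  · subst hc; rw [if_pos rfl]; exact ⟨_, rfl⟩
  · rw [if_neg hc]; exact ⟨_, rfl⟩

theorem squeeze_replaceDD (s : List Char) : squeeze (replaceDD s) = squeeze s := by
  match s with
  | [] => simp [replaceDD]
  | [c] => simp [replaceDD]
  | c :: d :: r =>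
    by_cases hcd : c = '-' ∧ d = '-'
    · obtain ⟨rfl, rfl⟩ := hcd
      rw [show replaceDD ('-' :: '-' :: r) = '-' :: replaceDD r from by simp [replaceDD]]
      rw [show squeeze ('-' :: '-' :: r) = squeeze ('-' :: r) from by simp [squeeze]]
      rw [squeeze_cons, squeeze_cons, squeeze_replaceDD r]
    · rw [show replaceDD (c :: d :: r) = c :: replaceDD (d :: r) from by simp [replaceDD, hcd]]
      rw [squeeze_cons, squeeze_cons, squeeze_replaceDD (d :: r)]

theorem squeeze_of_noDD (s : List Char) (h : hasDD s = false) : squeeze s = s := by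
  match s with
  | [] => simp [squeeze]
  | [c] => simp [squeeze]
  | c :: d :: r =>
    have hcd : ¬(c = '-' ∧ d = '-') := by
      intro ⟨h1, h2⟩; subst h1; subst h2; simp [hasDD] at h
    have hr : hasDD (d :: r) = false := by
      rw [hasDD] at h
      exact (Bool.or_eq_false_iff.mp h).2
    rw [show squeeze (c :: d :: r) = c :: squeeze (d :: r) from by simp [squeeze, hcd]]
    rw [squeeze_of_noDD (d :: r) hr]

theorem pyWhileCollapse_eq_squeeze (s : List Char) : pyWhileCollapse s = squeeze s := by
  rw [pyWhileCollapse]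
  by_cases h : PySem.Chars.isIn ['-', '-'] s = true
  · rw [if_pos h, replace_eq_replaceDD, pyWhileCollapse_eq_squeeze (replaceDD s),
      squeeze_replaceDD]
  · rw [if_neg h]
    exact (squeeze_of_noDD s (by rwa [isIn_eq_hasDD, Bool.not_eq_true] at h)).symm
termination_by s.length
decreasing_by
  exact replaceDD_length_lt s (by rwa [isIn_eq_hasDD] at h)

theorem hasDD_squeeze (s : List Char) : hasDD (squeeze s) = false := by
  fun_induction squeeze s with
  | case1 => simp [hasDD]
  | case2 c => simp [hasDD]
  | case3 c d r hcd ih => exact ih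
  | case4 c d r hcd ih =>
    obtain ⟨u, hu⟩ := squeeze_head d r
    rw [hu] at ih ⊢
    rw [hasDD]
    simp only [ih, Bool.or_false, Bool.and_eq_false_iff]
    by_cases hc : c = '-'
    · subst hc
      right
      simp only [decide_eq_false_iff_not]
      intro hd; exact hcd ⟨rfl, hd⟩
    · left; simp [hc]

-- B's loop from any accumulator
theorem foldl_step (m : List Char) : ∀ out : List Char,
    m.foldl (fun out c =>
      if decide (c = '-') && (out.isEmpty || out.getLast? == some '-') then out else out ++ [c]) out
    = out ++ (if out = [] ∨ out.getLast? = some '-' then ldrop (squeeze m) else squeeze m) := by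
  induction m with
  | nil => intro out; simp [squeeze, ldrop]
  | cons c rest ih =>
    intro out
    rw [List.foldl_cons]
    by_cases hc : c = '-'
    · subst hc
      have hcnd : ((decide (('-' : Char) = '-') && (out.isEmpty || out.getLast? == some '-')) = true)
          ↔ (out = [] ∨ out.getLast? = some '-') := by
        simp [List.isEmpty_iff]
      by_cases hout : out = [] ∨ out.getLast? = some '-'
      · rw [if_pos (hcnd.mpr hout)]
        rw [ih out, if_pos hout, if_pos hout, squeeze_cons, if_pos rfl]
        simp [ldrop]
      · rw [if_neg (fun h => hout (hcnd.mp h))]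
        rw [ih (out ++ ['-']), if_pos (Or.inr (by simp)), if_neg hout, squeeze_cons, if_pos rfl]
        simp [ldrop]
    · rw [if_neg (by simp [hc])]
      rw [ih (out ++ [c]), if_neg (by simp [hc]), squeeze_cons, if_neg hc]
      by_cases hout : out = [] ∨ out.getLast? = some '-'
      · rw [if_pos hout]; simp [ldrop, hc]
      · rw [if_neg hout]; simp

theorem foldl_step_f (f : Char → Char) (m : List Char) (out : List Char) :
    m.foldl (fun out ch =>
      if decide (f ch = '-') && (out.isEmpty || out.getLast? == some '-') then out
      else out ++ [f ch]) out
    = out ++ (if out = [] ∨ out.getLast? = some '-' then ldrop (squeeze (m.map f))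
              else squeeze (m.map f)) := by
  rw [← foldl_step (m.map f) out, List.foldl_map]

theorem hasDD_ldrop (s : List Char) (h : hasDD s = false) : hasDD (ldrop s) = false := by
  match s with
  | [] => rfl
  | c :: r =>
    rw [ldrop]
    by_cases hc : c = '-'
    · rw [if_pos hc]
      match r with
      | [] => rfl
      | d :: t =>
        rw [hasDD] at h
        exact (Bool.or_eq_false_iff.mp h).2
    · rw [if_neg hc]; exact h

theorem dropWhile_eq_ldrop (s : List Char) (h : hasDD s = false) :
    s.dropWhile (fun c => (['-'] : List Char).contains c) = ldrop s := by
  match s with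
  | [] => rfl
  | c :: t =>
    by_cases hc : c = '-'
    · subst hc
      rw [List.dropWhile_cons_of_pos (by simp)]
      match t with
      | [] => rfl
      | d :: u =>
        have hd : d ≠ '-' := by
          intro hd; subst hd; simp [hasDD] at h
        rw [List.dropWhile_cons_of_neg (by simp [hd]), ldrop, if_pos rfl]
    · rw [List.dropWhile_cons_of_neg (by simp [hc]), ldrop, if_neg hc]

theorem hasDD_reverse (s : List Char) : hasDD s.reverse = hasDD s := by
  by_cases h : hasDD s = true
  · rw [h, (hasDD_iff_infix _).mpr]
    have := (hasDD_iff_infix s).mp h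
    rw [show (['-', '-'] : List Char) = (['-', '-'] : List Char).reverse from rfl]
    exact List.reverse_infix.mpr this
  · rw [Bool.not_eq_true] at h
    rw [h]
    rw [← Bool.not_eq_true, hasDD_iff_infix]
    intro hc
    have : (['-', '-'] : List Char) <:+: s := by
      have := List.reverse_infix.mpr hc
      simpa using this
    rw [← hasDD_iff_infix] at this
    simp [this] at h

theorem ldrop_reverse_reverse (s : List Char) :
    (ldrop s.reverse).reverse = if s.getLast? == some '-' then s.dropLast else s := by
  induction s using List.reverseRecOn with
  | nil => simp [ldrop]
  | append_singleton t a _ =>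
    rw [List.reverse_append]
    simp only [List.reverse_singleton, List.singleton_append, ldrop]
    by_cases ha : a = '-'
    · subst ha
      rw [if_pos rfl, List.reverse_reverse]
      simp
    · rw [if_neg ha]
      have : ((t ++ [a]).getLast? == some '-') = false := by
        simp [ha]
      rw [this]
      simp

theorem stripChars_eq (s : List Char) (h : hasDD s = false) :
    PySem.Chars.stripChars s ['-'] =
      (if (ldrop s).getLast? == some '-' then (ldrop s).dropLast else ldrop s) := by
  rw [PySem.Chars.stripChars]
  rw [dropWhile_eq_ldrop s h]
  rw [dropWhile_eq_ldrop _ (by rw [hasDD_reverse]; exact hasDD_ldrop s h)]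
  exact ldrop_reverse_reverse (ldrop s)

-- ===== VERDICT (by name: the statement is the Claim_ definition above) =====
theorem sanitize_obsidian_tag_py_spec : Claim_equal_sanitize_obsidian_tag_py := by
  intro value _
  unfold Spec_sanitize_obsidian_tag_py sanitize_obsidian_tag_py sanitize_obsidian_tag_py_alt
  simp only []
  by_cases hraw : (PySem.Chars.strip value.toList).isEmpty = true
  · rw [if_pos hraw, if_pos hraw]
  · rw [if_neg hraw, if_neg hraw]
    rw [pyWhileCollapse_eq_squeeze, stripChars_eq _ (hasDD_squeeze _)]
    rw [foldl_step_f]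
    simp
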